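-- pv_equiv track=rewrite | github.com/yehyafarhat1/cis667-secretary-problem | algorithms/helpers.py | candidate_value
-- ===== SOURCE A (Python) =====
-- def remove(string_input):
--     return "".join(string_input.split())
--
-- def candidate_value(x): #returns the candidate value in a dataset
--     row = remove(x)
--     c = 0
--     final = ""
--     for i in row:
--         if i == ",": c += 1
--         if c == 1:
--             final = final + i
--         if i  ==2: break
--     return final[1:]
-- ===== SOURCE B (Python) =====
-- def remove(string_input):
--     return "".join(string_input.split())
--
-- def candidate_value(x):  # returns the candidate value in a dataset
--     row = remove(x)
--     parts = row.split(',')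
--     return parts[1] if len(parts) > 1 else ''
-- ===== Notes on version B (the rewrite author's own statement) =====
-- stated objective: faster
-- what changed: Replaces the per-character walk with a running comma counter (plus an unreachable break and a final trailing-trim slice) by one comma-split of the whitespace-stripped string, indexing the second field and returning an empty string when there is none.
import Mathlib
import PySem

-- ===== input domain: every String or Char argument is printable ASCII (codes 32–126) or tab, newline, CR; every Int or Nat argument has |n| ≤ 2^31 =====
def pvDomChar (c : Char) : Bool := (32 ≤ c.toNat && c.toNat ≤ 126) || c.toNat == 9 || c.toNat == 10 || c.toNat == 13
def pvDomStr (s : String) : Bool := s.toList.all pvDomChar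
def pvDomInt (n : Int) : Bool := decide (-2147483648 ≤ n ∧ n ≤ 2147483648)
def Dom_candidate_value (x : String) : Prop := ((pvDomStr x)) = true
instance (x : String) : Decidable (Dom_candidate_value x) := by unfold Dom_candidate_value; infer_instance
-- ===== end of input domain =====

-- B replaces A's character walk with a running comma counter by split-on-',' and indexing field 1 (simpler).

-- ===== PORT A =====
-- remove(string_input) = "".join(string_input.split())
def pyRemove (s : String) : String := PySem.Str.join "" (PySem.Str.split₀ s)

def candidate_value (x : String) : String :=
  let row := pyRemove x
  let st := row.toList.foldl (fun (acc : Int × List Char) i =>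
      let c := if i = ',' then acc.1 + 1 else acc.1
      let fin := if c = 1 then acc.2 ++ [i] else acc.2
      -- `if i == 2: break` compares a 1-char str with the int 2: always False in Python; no-op
      (c, fin)) (0, [])
  String.ofList (PySem.Chars.slice st.2 (some 1) none)   -- final[1:]

-- ===== PORT B =====
def candidate_value_alt (x : String) : String :=
  let row := pyRemove x
  let parts := PySem.Chars.splitOn row.toList [',']      -- row.split(',') (non-empty sep: exact)
  if 1 < parts.length then String.ofList (parts.getD 1 []) else ""

-- ===== PRECONDITION & SPEC =====
def Spec_candidate_value (x : String) (out : String) : Prop := out = candidate_value_alt x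
instance (x : String) (out : String) : Decidable (Spec_candidate_value x out) := by unfold Spec_candidate_value; infer_instance

-- ===== CLAIM (what is proved, stated in full; the proofs are below) =====
def Claim_equal_candidate_value : Prop := ∀ (x : String), Dom_candidate_value x → Spec_candidate_value x (candidate_value x)

-- ===== LEMMAS AND PROOFS =====

-- A's loop step, named so the lemmas can speak about it.
def pvStep (acc : Int × List Char) (i : Char) : Int × List Char :=
  let c := if i = ',' then acc.1 + 1 else acc.1
  let fin := if c = 1 then acc.2 ++ [i] else acc.2
  (c, fin)

theorem pvStep_comma (c : Int) (f : List Char) :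
    pvStep (c, f) ',' = (c + 1, if c + 1 = 1 then f ++ [','] else f) := rfl

theorem pvStep_of_ne (i : Char) (h : i ≠ ',') (c : Int) (f : List Char) :
    pvStep (c, f) i = (c, if c = 1 then f ++ [i] else f) := by
  simp [pvStep, h]

-- Structural form of Python's split on a single-character separator.
def pvSplitRec (s : Char) : List Char → List (List Char)
  | [] => [[]]
  | c :: rest =>
      if c = s then [] :: pvSplitRec s rest
      else (c :: (pvSplitRec s rest).headI) :: (pvSplitRec s rest).tail

def pvMapHead (f : List Char → List Char) : List (List Char) → List (List Char)
  | [] => []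
  | h :: t => f h :: t

theorem pvSplitRec_cons (s : Char) (cs : List Char) :
    ∃ h0 t0, pvSplitRec s cs = h0 :: t0 := by
  cases cs with
  | nil => exact ⟨[], [], rfl⟩
  | cons c rest =>
      unfold pvSplitRec
      split
      · exact ⟨_, _, rfl⟩
      · exact ⟨_, _, rfl⟩

theorem pvSplitRec_headI (s : Char) (cs : List Char) :
    (pvSplitRec s cs).headI = cs.takeWhile (· ≠ s) := by
  induction cs with
  | nil => simp [pvSplitRec]
  | cons c rest ih =>
      unfold pvSplitRec
      by_cases h : c = s <;> simp [h, ih]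

theorem pvGo_eq (s : Char) (cs : List Char) : ∀ (fuel : Nat), cs.length ≤ fuel →
    ∀ (cur : List Char) (acc : List (List Char)),
    PySem.Chars.splitOn.go [s] fuel cs cur acc
      = acc.reverse ++ pvMapHead (cur.reverse ++ ·) (pvSplitRec s cs) := by
  induction cs with
  | nil =>
      intro fuel _ cur acc
      cases fuel <;> simp [PySem.Chars.splitOn.go, pvSplitRec, pvMapHead]
  | cons c rest ih =>
      intro fuel hf cur acc
      cases fuel with
      | zero => simp at hf
      | succ f =>
          have hf' : rest.length ≤ f := by simpa using hf
          obtain ⟨h0, t0, hsr⟩ := pvSplitRec_cons s rest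
          by_cases h : c = s
          · have hpre : List.isPrefixOf [s] (c :: rest) = true := by
              simp [List.isPrefixOf, h]
            rw [PySem.Chars.splitOn.go, if_pos hpre]
            simp only [List.length_cons, List.drop_succ_cons, List.length_nil, List.drop_zero]
            rw [ih f hf' [] (cur.reverse :: acc)]
            simp [pvSplitRec, h, hsr, pvMapHead]
          · have hpre : List.isPrefixOf [s] (c :: rest) = false := by
              simp only [List.isPrefixOf, Bool.and_eq_false_iff]
              left
              simp
              intro hc
              exact absurd hc.symm h
            rw [PySem.Chars.splitOn.go, if_neg (by simp [hpre])]
            rw [ih f hf' (c :: cur) acc]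
            simp [pvSplitRec, h, hsr, pvMapHead]

theorem pvSplitOn_eq (s : Char) (cs : List Char) :
    PySem.Chars.splitOn cs [s] = pvSplitRec s cs := by
  show PySem.Chars.splitOn.go [s] (cs.length + 1) cs [] [] = _
  rw [pvGo_eq s cs (cs.length + 1) (by omega) [] []]
  obtain ⟨h0, t0, hsr⟩ := pvSplitRec_cons s cs
  simp [hsr, pvMapHead]

-- A's loop after the second comma: final never changes.
theorem pvFoldl_two (cs : List Char) : ∀ (c : Int) (f : List Char), 2 ≤ c →
    (cs.foldl pvStep (c, f)).2 = f := by
  induction cs with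
  | nil => intro c f _; rfl
  | cons i rest ih =>
      intro c f hc
      by_cases h : i = ','
      · subst h
        rw [List.foldl_cons, pvStep_comma, if_neg (by omega)]
        exact ih (c + 1) f (by omega)
      · rw [List.foldl_cons, pvStep_of_ne i h, if_neg (by omega)]
        exact ih c f hc

-- A's loop between the first and second comma: it appends the chars up to the next comma.
theorem pvFoldl_one (cs : List Char) : ∀ (f : List Char),
    (cs.foldl pvStep (1, f)).2 = f ++ cs.takeWhile (· ≠ ',') := by
  induction cs with
  | nil => intro f; simp
  | cons i rest ih =>
      intro f
      by_cases h : i = ','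
      · subst h
        rw [List.foldl_cons, pvStep_comma, if_neg (by omega)]
        have h2 : (1 : Int) + 1 = 2 := by omega
        rw [h2, pvFoldl_two rest 2 f (by omega)]
        simp
      · rw [List.foldl_cons, pvStep_of_ne i h, if_pos rfl, ih (f ++ [i])]
        simp [h]

-- A's loop from the start: final is ',' followed by the second comma field (or empty).
theorem pvFoldl_zero (cs : List Char) :
    (cs.foldl pvStep ((0 : Int), ([] : List Char))).2
      = if ',' ∈ cs then ',' :: ((cs.dropWhile (· ≠ ',')).tail.takeWhile (· ≠ ',')) else [] := by
  induction cs with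
  | nil => simp
  | cons i rest ih =>
      by_cases h : i = ','
      · subst h
        rw [List.foldl_cons, pvStep_comma, if_pos (by omega)]
        have h1 : (0 : Int) + 1 = 1 := by omega
        rw [h1, pvFoldl_one rest ([] ++ [','])]
        simp
      · rw [List.foldl_cons, pvStep_of_ne i h, if_neg (by omega), ih]
        have h' : ¬ (',' = i) := fun hh => h hh.symm
        by_cases hm : ',' ∈ rest <;> simp [hm, h, h']

-- B's split-and-index produces the same second comma field.
theorem pvB_eq (cs : List Char) :
    (if 1 < (pvSplitRec ',' cs).length then (pvSplitRec ',' cs).getD 1 [] else [])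
      = if ',' ∈ cs then ((cs.dropWhile (· ≠ ',')).tail.takeWhile (· ≠ ',')) else [] := by
  induction cs with
  | nil => simp [pvSplitRec]
  | cons c rest ih =>
      obtain ⟨h0, t0, hsr⟩ := pvSplitRec_cons ',' rest
      by_cases h : c = ','
      · subst h
        have hh : h0 = rest.takeWhile (· ≠ ',') := by
          have := pvSplitRec_headI ',' rest
          rw [hsr] at this
          simpa using this
        simp [pvSplitRec, hsr, hh]
      · have h' : ¬ (',' = c) := fun hh => h hh.symm
        rw [hsr] at ih
        simp only [pvSplitRec, if_neg h, hsr, List.headI_cons, List.tail_cons]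
        have hL : (if 1 < ((c :: h0) :: t0).length then ((c :: h0) :: t0).getD 1 [] else [])
            = (if 1 < (h0 :: t0).length then (h0 :: t0).getD 1 [] else []) := by
          simp [List.getD]
        rw [hL, ih]
        by_cases hm : ',' ∈ rest <;> simp [hm, h, h']

-- ===== VERDICT (by name: the statement is the Claim_ definition above) =====
theorem candidate_value_spec : Claim_equal_candidate_value := by
  intro x _
  unfold Spec_candidate_value candidate_value candidate_value_alt
  simp only [PySem.Chars.slice, PySem.List.slice_from_one]
  set cs := (pyRemove x).toList with hcs
  have hA : (cs.foldl (fun (acc : Int × List Char) i =>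
      let c := if i = ',' then acc.1 + 1 else acc.1
      let fin := if c = 1 then acc.2 ++ [i] else acc.2
      (c, fin)) (0, [])) = cs.foldl pvStep (0, []) := rfl
  rw [hA, pvSplitOn_eq]
  have h0 := pvFoldl_zero cs
  have hB := pvB_eq cs
  by_cases hm : ',' ∈ cs
  · rw [if_pos hm] at h0 hB
    rw [h0, List.tail_cons, ← hB]
    by_cases hp : 1 < (pvSplitRec ',' cs).length <;> simp [hp]
  · rw [if_neg hm] at h0 hB
    rw [h0, ← hB]
    by_cases hp : 1 < (pvSplitRec ',' cs).length
    · have hnil : (pvSplitRec ',' cs)[1] = [] := by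
        rw [if_pos hp] at hB
        rwa [List.getD_eq_getElem _ _ hp] at hB
      simp [hp, hnil]
    · simp [hp]
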